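-- pv_equiv track=rewrite | github.com/P0rth0s/Mobile_Networking_Experiments | experiment_1/experiment.py | eventTimeblocks
-- ===== SOURCE A (Python) =====
-- def eventTimeblocks(data):
--     sixThirty = 390
--     nineThirty = 570
--     elevenThirty = 720
--     fourteenThirty = 870
--     seventeenThirty = 1050
--     twentyThirty = 1230
--     earlyBirds = []
--     munchers = []
--     stompers = []
--     for row in data:
--         if row['startTime'] > sixThirty and row['startTime'] < nineThirty:
--             earlyBirds.append(row)
--         elif row['startTime'] > elevenThirty and row['startTime'] < fourteenThirty:
--             munchers.append(row)
--         elif row['startTime'] > seventeenThirty and row['startTime'] < twentyThirty: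
--             stompers.append(row)
--     return (earlyBirds, munchers, stompers)
-- ===== SOURCE B (Python) =====
-- def eventTimeblocks(data):
--     earlyBirds = [row for row in data if 390 < row['startTime'] < 570]
--     munchers = [row for row in data if 720 < row['startTime'] < 870]
--     stompers = [row for row in data if 1050 < row['startTime'] < 1230]
--     return (earlyBirds, munchers, stompers)
-- ===== Notes on version B (the rewrite author's own statement) =====
-- stated objective: simpler
-- what changed: Replaces the single accumulator loop with if/elif branching by three independent list-comprehension filters over disjoint time windows; correct because the windows are pairwise disjoint.
import Mathlib
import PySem

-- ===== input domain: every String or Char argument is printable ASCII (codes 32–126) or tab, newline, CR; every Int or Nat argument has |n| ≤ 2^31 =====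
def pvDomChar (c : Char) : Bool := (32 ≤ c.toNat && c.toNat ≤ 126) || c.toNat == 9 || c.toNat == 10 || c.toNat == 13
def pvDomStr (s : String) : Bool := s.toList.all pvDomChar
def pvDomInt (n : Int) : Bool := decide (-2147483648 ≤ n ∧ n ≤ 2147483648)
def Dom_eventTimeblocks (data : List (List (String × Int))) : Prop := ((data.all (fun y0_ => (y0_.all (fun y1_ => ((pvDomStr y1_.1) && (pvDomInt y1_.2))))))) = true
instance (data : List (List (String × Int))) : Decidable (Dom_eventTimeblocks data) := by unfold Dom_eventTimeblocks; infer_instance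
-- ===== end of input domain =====

-- ===== PORT A =====
-- B changes the single if/elif pass into three independent filters (simpler decomposition); same return value.
-- Pre_ excludes inputs on which Python A raises KeyError (a row without key 'startTime').

-- row['startTime'] : first-match association lookup (Python dict lookup; none = KeyError)
def pvLookupST (row : List (String × Int)) : Option Int :=
  (row.find? (fun p => p.1 == "startTime")).map (·.2)

-- A's loop: three accumulators, if/elif chain; none = the loop raised KeyError
def pvLoopA : List (List (String × Int)) →
    (List (List (String × Int))) × (List (List (String × Int))) × (List (List (String × Int))) →
    Option ((List (List (String × Int))) × (List (List (String × Int))) × (List (List (String × Int))))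
  | [], acc => some acc
  | row :: rest, (e, m, s) =>
    match pvLookupST row with
    | none => none
    | some t =>
      if t > 390 ∧ t < 570 then pvLoopA rest (e ++ [row], m, s)
      else if t > 720 ∧ t < 870 then pvLoopA rest (e, m ++ [row], s)
      else if t > 1050 ∧ t < 1230 then pvLoopA rest (e, m, s ++ [row])
      else pvLoopA rest (e, m, s)

def eventTimeblocks (data : List (List (String × Int))) : (List (List (String × Int))) × (List (List (String × Int))) × (List (List (String × Int))) :=
  (pvLoopA data ([], [], [])).getD ([], [], [])

-- ===== PORT B =====
def eventTimeblocks_alt (data : List (List (String × Int))) : (List (List (String × Int))) × (List (List (String × Int))) × (List (List (String × Int))) :=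
  (data.filter (fun row => match pvLookupST row with | some t => decide (390 < t ∧ t < 570) | none => false),
   data.filter (fun row => match pvLookupST row with | some t => decide (720 < t ∧ t < 870) | none => false),
   data.filter (fun row => match pvLookupST row with | some t => decide (1050 < t ∧ t < 1230) | none => false))

-- ===== PRECONDITION & SPEC =====
-- Pre_: every row carries the key 'startTime'; otherwise both Pythons raise KeyError.
def Pre_eventTimeblocks (data : List (List (String × Int))) : Prop :=
  data.all (fun row => row.any (fun p => p.1 == "startTime")) = true
instance (data : List (List (String × Int))) : Decidable (Pre_eventTimeblocks data) := by unfold Pre_eventTimeblocks; infer_instance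

def pvWitness_eventTimeblocks : (List (List (String × Int))) :=
  [[("startTime", 400)], [("startTime", 800), ("x", 1)], [("startTime", 1100)], [("startTime", 0)]]

def Spec_eventTimeblocks (data : List (List (String × Int))) (out : (List (List (String × Int))) × (List (List (String × Int))) × (List (List (String × Int)))) : Prop := out = eventTimeblocks_alt data
instance (data : List (List (String × Int))) (out : (List (List (String × Int))) × (List (List (String × Int))) × (List (List (String × Int)))) : Decidable (Spec_eventTimeblocks data out) := by unfold Spec_eventTimeblocks; infer_instance

-- ===== CLAIM (what is proved, stated in full; the proofs are below) =====
def Claim_equal_eventTimeblocks : Prop := ∀ (data : List (List (String × Int))), Dom_eventTimeblocks data → Pre_eventTimeblocks data → Spec_eventTimeblocks data (eventTimeblocks data)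

-- ===== LEMMAS AND PROOFS =====

def pvF (lo hi : Int) (data : List (List (String × Int))) : List (List (String × Int)) :=
  data.filter (fun row => match pvLookupST row with | some t => decide (lo < t ∧ t < hi) | none => false)

theorem pvF_cons (lo hi : Int) (row : List (String × Int)) (rest : List (List (String × Int))) :
    pvF lo hi (row :: rest) =
      (if (match pvLookupST row with | some t => decide (lo < t ∧ t < hi) | none => false) = true
       then row :: pvF lo hi rest else pvF lo hi rest) := by
  simp [pvF, List.filter_cons]

theorem pvLoopA_spec : ∀ (data : List (List (String × Int)))
    (e m s : List (List (String × Int))),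
    Pre_eventTimeblocks data →
    pvLoopA data (e, m, s) =
      some (e ++ pvF 390 570 data, m ++ pvF 720 870 data, s ++ pvF 1050 1230 data) := by
  intro data
  induction data with
  | nil => intro e m s _; simp [pvLoopA, pvF]
  | cons row rest ih =>
    intro e m s hpre
    have hp := hpre
    rw [Pre_eventTimeblocks, List.all_cons, Bool.and_eq_true] at hp
    have hrow : row.any (fun p => p.1 == "startTime") = true := hp.1
    have hrest : Pre_eventTimeblocks rest := hp.2
    have hsome : (pvLookupST row).isSome := by
      rcases List.any_eq_true.mp hrow with ⟨p, hp, hk⟩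
      have : (row.find? (fun p => p.1 == "startTime")).isSome :=
        List.find?_isSome.mpr ⟨p, hp, hk⟩
      simpa [pvLookupST] using this
    rcases Option.isSome_iff_exists.mp hsome with ⟨t, ht⟩
    rw [show pvLoopA (row :: rest) (e, m, s) =
      (match pvLookupST row with
       | none => none
       | some t =>
         if t > 390 ∧ t < 570 then pvLoopA rest (e ++ [row], m, s)
         else if t > 720 ∧ t < 870 then pvLoopA rest (e, m ++ [row], s)
         else if t > 1050 ∧ t < 1230 then pvLoopA rest (e, m, s ++ [row])
         else pvLoopA rest (e, m, s)) from rfl]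
    rw [ht]
    rw [pvF_cons, pvF_cons, pvF_cons, ht]
    by_cases h1 : t > 390 ∧ t < 570
    · have h2 : ¬ (720 < t ∧ t < 870) := by omega
      have h3 : ¬ (1050 < t ∧ t < 1230) := by omega
      simp only [ih _ _ _ hrest]
      simp [h1, h2, h3]
    · by_cases h2 : t > 720 ∧ t < 870
      · have h3 : ¬ (1050 < t ∧ t < 1230) := by omega
        simp only [ih _ _ _ hrest]
        simp [h1, h2, h3]
      · by_cases h3 : t > 1050 ∧ t < 1230
        · simp only [ih _ _ _ hrest]
          simp [h1, h2, h3]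
        · simp only [ih _ _ _ hrest]
          simp [h1, h2, h3]

-- ===== VERDICT (by name: the statement is the Claim_ definition above) =====
theorem eventTimeblocks_spec : Claim_equal_eventTimeblocks := by
  intro data _ hpre
  unfold Spec_eventTimeblocks eventTimeblocks eventTimeblocks_alt
  rw [pvLoopA_spec data [] [] [] hpre]
  simp [pvF]
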